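-- pv_equiv track=rewrite | github.com/AlexEnersen/VTAPS | singleplayer/views.py | getDate
-- ===== SOURCE A (Python) =====
-- def getDate(text):
--     onDate = False
--     for line in text:
--         if (line.startswith("@P PDATE")):
--             onDate = True
--         elif (onDate):
--             onDate = False
--             lineItems = line.split()
--             return lineItems[1]
-- ===== SOURCE B (Python) =====
-- def getDate(text):
--     # Staged passes over a precomputed boolean mask of marker lines:
--     # find the first marker index, then the first non-marker index after it.
--     markers = [line.startswith("@P PDATE") for line in text]
--     if True not in markers:
--         return None
--     i = markers.index(True)
--     after = markers[i + 1:]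
--     if False not in after:
--         return None
--     j = i + 1 + after.index(False)
--     return text[j].split()[1]
-- ===== Notes on version B (the rewrite author's own statement) =====
-- stated objective: alternative
-- what changed: Replaces A's single-pass boolean state machine over the lines with index arithmetic on a precomputed boolean marker mask: build the mask once, locate the first marker with list.index, locate the first non-marker after it with a second index pass on a slice, and fetch that line by position.
import Mathlib
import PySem

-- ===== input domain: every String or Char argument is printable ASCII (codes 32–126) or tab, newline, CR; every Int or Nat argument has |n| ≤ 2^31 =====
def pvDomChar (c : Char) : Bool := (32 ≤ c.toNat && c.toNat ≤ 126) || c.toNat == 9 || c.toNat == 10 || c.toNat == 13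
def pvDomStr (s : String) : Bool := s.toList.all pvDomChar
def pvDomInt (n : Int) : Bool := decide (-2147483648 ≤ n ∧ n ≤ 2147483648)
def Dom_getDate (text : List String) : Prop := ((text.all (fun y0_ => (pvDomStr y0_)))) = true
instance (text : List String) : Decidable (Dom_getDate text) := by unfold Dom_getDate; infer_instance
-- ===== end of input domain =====

-- B replaces A's single-pass boolean state machine with index arithmetic on a
-- precomputed marker mask (two index? passes + positional fetch): an alternative
-- decomposition, same cost.


-- ===== PORT A =====
-- A's single pass with the mutable boolean onDate, as structural recursion over the lines.
def getDateLoopA (onDate : Bool) : List String → Option String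
  | [] => none
  | line :: rest =>
    if PySem.Str.startswith line "@P PDATE" then
      getDateLoopA true rest
    else if onDate then
      PySem.List.pyGet? (PySem.Str.split₀ line) 1   -- lineItems[1]; none = IndexError, excluded by Pre_
    else
      getDateLoopA onDate rest

def getDate (text : List String) : Option String := getDateLoopA false text

-- ===== PORT B =====
-- Source B: mask of marker lines, first True index, first False index after it, positional fetch.
-- ('if True not in markers: return None; i = markers.index(True)' is the none/some match on index?.)
def getDate_alt (text : List String) : Option String :=
  let markers := text.map (fun line => PySem.Str.startswith line "@P PDATE")
  match PySem.List.index? markers true with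
  | none => none                                   -- True not in markers
  | some i =>
    let after := markers.drop (i + 1)              -- markers[i+1:]
    match PySem.List.index? after false with
    | none => none                                 -- False not in after
    | some k =>
      match PySem.List.pyGet? text ((i : Int) + 1 + (k : Int)) with   -- text[j]
      | none => none
      | some line => PySem.List.pyGet? (PySem.Str.split₀ line) 1     -- text[j].split()[1]

-- ===== PRECONDITION & SPEC =====
-- The "date line" is the first non-marker line after the first marker line, if any.
def pvDateLine (text : List String) : Option String :=
  match text.dropWhile (fun l => !(PySem.Str.startswith l "@P PDATE")) with
  | [] => none
  | _ :: rest => (rest.dropWhile (fun l => PySem.Str.startswith l "@P PDATE")).head?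

-- Pre_ excludes exactly the inputs on which A raises IndexError: those whose
-- date line has fewer than two whitespace-separated tokens.
def Pre_getDate (text : List String) : Prop :=
  ∀ l, pvDateLine text = some l → 2 ≤ (PySem.Str.split₀ l).length
instance (text : List String) : Decidable (Pre_getDate text) := by unfold Pre_getDate; infer_instance

def pvWitness_getDate : List String := ["x", "@P PDATE", "@P PDATE y", "2024-01-02 3", "z"]

def Spec_getDate (text : List String) (out : Option String) : Prop := out = getDate_alt text
instance (text : List String) (out : Option String) : Decidable (Spec_getDate text out) := by unfold Spec_getDate; infer_instance

-- ===== CLAIM =====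
def Claim_equal_getDate : Prop := ∀ (text : List String), Dom_getDate text → Pre_getDate text → Spec_getDate text (getDate text)

-- ===== LEMMAS AND PROOFS =====
-- Unfolding of B's port with its let-bindings inlined (definitional).
theorem getDate_alt_def (text : List String) :
    getDate_alt text =
      match PySem.List.index? (text.map (fun l => PySem.Str.startswith l "@P PDATE")) true with
      | none => none
      | some i =>
        match PySem.List.index? ((text.map (fun l => PySem.Str.startswith l "@P PDATE")).drop (i + 1)) false with
        | none => none
        | some k =>
          match PySem.List.pyGet? text ((i : Int) + 1 + (k : Int)) with
          | none => none
          | some line => PySem.List.pyGet? (PySem.Str.split₀ line) 1 := rfl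

-- A's loop with the flag up computes B's "first False in the mask, fetch that line" stage.
theorem getDateLoopA_true_eq (rest : List String) :
    getDateLoopA true rest =
      match PySem.List.index? (rest.map (fun l => PySem.Str.startswith l "@P PDATE")) false with
      | none => none
      | some k =>
        match rest[k]? with
        | none => none
        | some line => PySem.List.pyGet? (PySem.Str.split₀ line) 1 := by
  induction rest with
  | nil => simp [getDateLoopA, PySem.List.index?]
  | cons line rs ih =>
    by_cases h : PySem.Str.startswith line "@P PDATE" = true
    · rw [getDateLoopA, if_pos h, ih, List.map_cons, h,
        PySem.List.index?_cons_of_ne _ (by simp)]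
      cases hk : PySem.List.index? (rs.map (fun l => PySem.Str.startswith l "@P PDATE")) false with
      | none => simp
      | some k => simp
    · rw [getDateLoopA, if_neg h, if_pos rfl, List.map_cons]
      rw [Bool.not_eq_true] at h
      rw [h, PySem.List.index?_cons_self]
      simp

-- A's full run equals B's staged-pass computation.
theorem getDateLoopA_eq_alt (text : List String) :
    getDateLoopA false text = getDate_alt text := by
  induction text with
  | nil => simp [getDateLoopA, getDate_alt, PySem.List.index?]
  | cons line rs ih =>
    by_cases h : PySem.Str.startswith line "@P PDATE" = true
    · rw [getDateLoopA, if_pos h, getDateLoopA_true_eq, getDate_alt_def,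
        List.map_cons, h, PySem.List.index?_cons_self]
      simp only [List.drop_succ_cons, List.drop_zero]
      cases hk : PySem.List.index? (rs.map (fun l => PySem.Str.startswith l "@P PDATE")) false with
      | none => simp
      | some k =>
        have hcast : ((0 : Nat) : Int) + 1 + (k : Int) = ((k + 1 : Nat) : Int) := by push_cast; ring
        simp only [hcast, PySem.List.pyGet?_natCast, List.getElem?_cons_succ]
    · rw [getDateLoopA, if_neg h, if_neg (by simp), ih, getDate_alt_def, getDate_alt_def,
        List.map_cons]
      rw [Bool.not_eq_true] at h
      rw [h, PySem.List.index?_cons_of_ne _ (by simp)]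
      cases hi : PySem.List.index? (rs.map (fun l => PySem.Str.startswith l "@P PDATE")) true with
      | none => simp
      | some i =>
        simp only [Option.map_some, List.drop_succ_cons]
        cases hk : PySem.List.index? ((rs.map (fun l => PySem.Str.startswith l "@P PDATE")).drop (i + 1)) false with
        | none => simp
        | some k =>
          have hcast : ((i + 1 : Nat) : Int) + 1 + (k : Int) = (((i + 1 + k : Nat) : Int)) + 1 := by push_cast; ring
          have hcast2 : ((i : Nat) : Int) + 1 + (k : Int) = ((i + 1 + k : Nat) : Int) := by push_cast; ring
          simp only [hcast, hcast2, PySem.List.pyGet?_cons_succ]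

-- ===== VERDICT =====
theorem getDate_spec : Claim_equal_getDate := by
  intro text _ _
  unfold Spec_getDate getDate
  exact getDateLoopA_eq_alt text
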